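-- pv_equiv track=rewrite | github.com/ffpacheco/Uni | FP/prep3.py | horizontais
-- ===== SOURCE A (Python) =====
-- def horizontais(lista):
--     sum=0
--     sum2=0
--     for numbers in lista[1:]:
--         sum+=numbers
--     for numbs in lista[:-1]:
--         sum2+=numbs
--     if sum==4 or sum==8 or sum2==4 or sum2==8: return True
--     else: return False
-- ===== SOURCE B (Python) =====
-- def horizontais(lista):
--     # Streaming single pass with a one-element delay: s1 sums every element
--     # except the first, s2 sums every element except the last (each element is
--     # added to s2 only once its successor is seen). No slices, no len, no guards.
--     s1 = 0
--     s2 = 0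
--     prev = None
--     for x in lista:
--         if prev is not None:
--             s1 += x
--             s2 += prev
--         prev = x
--     return s1 in (4, 8) or s2 in (4, 8)
-- ===== Notes on version B (the rewrite author's own statement) =====
-- stated objective: alternative
-- what changed: B replaces A's two slice-copy-and-sum loops by a single streaming pass with a one-element delay buffer: each element after the first feeds s1, and each element is added to s2 only once a successor appears, so the last element is never counted.
import Mathlib
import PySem

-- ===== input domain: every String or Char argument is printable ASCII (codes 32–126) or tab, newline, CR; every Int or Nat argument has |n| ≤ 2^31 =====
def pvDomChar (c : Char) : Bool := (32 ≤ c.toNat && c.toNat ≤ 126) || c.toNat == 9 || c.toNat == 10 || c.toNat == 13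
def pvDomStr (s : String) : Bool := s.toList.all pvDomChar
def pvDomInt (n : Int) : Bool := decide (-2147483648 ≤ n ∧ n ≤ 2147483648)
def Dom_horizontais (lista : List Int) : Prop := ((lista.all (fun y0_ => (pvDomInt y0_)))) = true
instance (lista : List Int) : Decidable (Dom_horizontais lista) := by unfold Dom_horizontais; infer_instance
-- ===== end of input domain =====

-- B replaces A's two slice-summing loops by one streaming pass with a one-element delay buffer (alternative decomposition, same O(n) cost).


-- ===== PORT A =====
def horizontais (lista : List Int) : Bool :=
  let sum := (PySem.List.slice lista (some 1) none).foldl (fun a b => a + b) 0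
  let sum2 := (PySem.List.slice lista none (some (-1))).foldl (fun a b => a + b) 0
  if sum == 4 || sum == 8 || sum2 == 4 || sum2 == 8 then true else false

-- ===== PORT B =====
-- one loop over the elements; state (s1, s2, prev): the 'if prev is not None' branch
def horizontais_alt (lista : List Int) : Bool :=
  let st := lista.foldl
    (fun (acc : Int × Int × Option Int) x =>
      match acc with
      | (s1, s2, none) => (s1, s2, some x)
      | (s1, s2, some p) => (s1 + x, s2 + p, some x))
    (0, 0, none)
  st.1 == 4 || st.1 == 8 || st.2.1 == 4 || st.2.1 == 8

-- ===== PRECONDITION & SPEC =====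
def Spec_horizontais (lista : List Int) (out : Bool) : Prop := out = horizontais_alt lista
instance (lista : List Int) (out : Bool) : Decidable (Spec_horizontais lista out) := by unfold Spec_horizontais; infer_instance

-- ===== CLAIM (what is proved, stated in full; the proofs are below) =====
def Claim_equal_horizontais : Prop := ∀ (lista : List Int), Dom_horizontais lista → Spec_horizontais lista (horizontais lista)

-- ===== LEMMAS AND PROOFS =====
theorem pv_foldl_add (l : List Int) (s : Int) :
    l.foldl (fun a b => a + b) s = s + l.sum := by
  induction l generalizing s with
  | nil => simp
  | cons x xs ih => simp [List.foldl, ih]; ring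

-- invariant of B's streaming fold once the delay buffer is filled
theorem pv_stream_inv (xs : List Int) (s1 s2 p : Int) :
    xs.foldl
      (fun (acc : Int × Int × Option Int) x =>
        match acc with
        | (a, b, none) => (a, b, some x)
        | (a, b, some q) => (a + x, b + q, some x))
      (s1, s2, some p)
    = (s1 + xs.sum, s2 + (p :: xs).dropLast.sum, some ((p :: xs).getLast (by simp))) := by
  induction xs generalizing s1 s2 p with
  | nil => simp
  | cons x xs ih =>
    simp only [List.foldl, ih, List.sum_cons, List.dropLast_cons₂, Prod.mk.injEq]
    refine ⟨by ring, by ring, ?_⟩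
    simp [List.getLast_cons]

-- ===== VERDICT (by name: the statement is the Claim_ definition above) =====
theorem horizontais_spec : Claim_equal_horizontais := by
  intro lista _
  unfold Spec_horizontais horizontais horizontais_alt
  cases lista with
  | nil => simp [PySem.List.slice]
  | cons x xs =>
    simp only [PySem.List.slice_from_one, PySem.List.slice_to_neg_one, List.tail_cons,
      pv_foldl_add, List.foldl, pv_stream_inv]
    rcases Bool.eq_false_or_eq_true (xs.sum == 4 || xs.sum == 8 ||
        (x :: xs).dropLast.sum == 4 || (x :: xs).dropLast.sum == 8) with h | h <;>
      simp_all
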